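-- pv_equiv track=rewrite | github.com/nlpet/codewars | Fundamentals/find_added.py | findAdded
-- ===== SOURCE A (Python) =====
-- from collections import Counter
--
-- def findAdded(s1, s2):
--     c1 = Counter(s1)
--     c2 = Counter(s2)
--     result = []
--
--     for num, c in c2.items():
--         if num not in c1:
--             result.extend([num] * c)
--         elif c > c1[num]:
--             result.extend([num] * (c - c1[num]))
--     return ''.join(sorted(result))
-- ===== SOURCE B (Python) =====
-- def findAdded(s1, s2):
--     sa = sorted(s1)
--     sb = sorted(s2)
--     i = 0
--     out = []
--     for ch in sb:
--         while i < len(sa) and sa[i] < ch: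
--             i += 1
--         if i < len(sa) and sa[i] == ch:
--             i += 1
--         else:
--             out.append(ch)
--     return ''.join(out)
-- ===== Notes on version B (the rewrite author's own statement) =====
-- stated objective: alternative
-- what changed: Replaces Counter(s1)/Counter(s2) hash-count difference plus a final sort of the surplus characters by sorting both strings once and emitting the surplus in a single two-pointer merge scan over the sorted lists.
import Mathlib
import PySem

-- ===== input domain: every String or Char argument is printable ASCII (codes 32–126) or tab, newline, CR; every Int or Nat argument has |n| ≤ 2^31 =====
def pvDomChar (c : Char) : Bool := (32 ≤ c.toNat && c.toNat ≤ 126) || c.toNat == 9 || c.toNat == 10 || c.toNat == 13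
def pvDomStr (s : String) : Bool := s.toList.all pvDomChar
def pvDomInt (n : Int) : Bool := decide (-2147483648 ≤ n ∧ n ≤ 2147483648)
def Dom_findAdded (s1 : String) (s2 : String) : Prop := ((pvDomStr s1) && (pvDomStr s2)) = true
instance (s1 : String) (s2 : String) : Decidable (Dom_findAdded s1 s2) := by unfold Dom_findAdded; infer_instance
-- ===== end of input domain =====

-- B replaces the Counter-difference with a sort-then-merge scan (alternative algorithm, similar cost).

-- ===== PORT A =====
-- Counter(s) is PySem.Dict.counter; '[num] * c' is List.replicate c.toNat (counts are positive);
-- 'c1[num]' in the elif (key known present) is ported as getD c1 num 0, which equals the stored value.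
def findAdded (s1 : String) (s2 : String) : String :=
  let c1 := PySem.Dict.counter s1.toList
  let c2 := PySem.Dict.counter s2.toList
  let result := c2.items.foldl (fun r p =>
    if !(c1.contains p.1) then r ++ List.replicate p.2.toNat p.1
    else if p.2 > c1.getD p.1 0 then r ++ List.replicate (p.2 - c1.getD p.1 0).toNat p.1
    else r) []
  String.mk (PySem.List.sorted result (fun x => x) false)

-- ===== PORT B =====
-- the inner 'while i < len(sa) and sa[i] < ch: i += 1' (the index i is kept as the remaining suffix of sa)
def pvSkip (ch : Char) : List Char → List Char
  | [] => []
  | a :: sa => if a < ch then pvSkip ch sa else a :: sa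

-- the 'for ch in sb' loop, state = (remaining sa, out)
def pvLoop (sa : List Char) (out : List Char) : List Char → List Char
  | [] => out
  | ch :: sb =>
    match pvSkip ch sa with
    | a :: rest => if a = ch then pvLoop rest out sb else pvLoop (a :: rest) (out ++ [ch]) sb
    | [] => pvLoop [] (out ++ [ch]) sb

def findAdded_alt (s1 : String) (s2 : String) : String :=
  let sa := PySem.List.sorted s1.toList (fun x => x) false
  let sb := PySem.List.sorted s2.toList (fun x => x) false
  String.mk (pvLoop sa [] sb)

-- ===== PRECONDITION & SPEC =====
def Spec_findAdded (s1 : String) (s2 : String) (out : String) : Prop := out = findAdded_alt s1 s2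
instance (s1 : String) (s2 : String) (out : String) : Decidable (Spec_findAdded s1 s2 out) := by unfold Spec_findAdded; infer_instance

-- ===== CLAIM (what is proved, stated in full; the proofs are below) =====
def Claim_equal_findAdded : Prop := ∀ (s1 : String) (s2 : String), Dom_findAdded s1 s2 → Spec_findAdded s1 s2 (findAdded s1 s2)

-- ===== LEMMAS AND PROOFS =====

-- a sorted list with head a contains nothing smaller than a
theorem pv_count_head_lt {a c : Char} {l : List Char}
    (hp : (a :: l).Pairwise (· ≤ ·)) (h : c < a) : (a :: l).count c = 0 := by
  rw [List.count_eq_zero]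
  intro hm
  rcases List.mem_cons.1 hm with rfl | hm
  · exact absurd h (lt_irrefl _)
  · exact absurd ((List.pairwise_cons.1 hp).1 c hm) (not_le.2 h)

theorem pvSkip_sublist (ch : Char) (sa : List Char) : (pvSkip ch sa).Sublist sa := by
  induction sa with
  | nil => simp [pvSkip]
  | cons a sa ih =>
    simp only [pvSkip]
    split_ifs
    · exact ih.trans (List.sublist_cons_self a sa)
    · exact List.Sublist.refl _

theorem pvSkip_head_not_lt (ch : Char) (sa : List Char) {a : Char} {rest : List Char}
    (h : pvSkip ch sa = a :: rest) : ¬ a < ch := by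
  induction sa with
  | nil => simp [pvSkip] at h
  | cons b sa ih =>
    simp only [pvSkip] at h
    split_ifs at h with hb
    · exact ih h
    · cases h; exact hb

-- skipping only elements < ch does not change the count of any c ≥ ch
theorem pvSkip_count_ge {ch c : Char} (h : ch ≤ c) (sa : List Char) :
    (pvSkip ch sa).count c = sa.count c := by
  induction sa with
  | nil => rfl
  | cons a sa ih =>
    simp only [pvSkip]
    split_ifs with ha
    · have hne : (a == c) = false := by
        simp only [beq_eq_false_iff_ne]
        exact fun e => absurd (lt_of_lt_of_le ha h) (e ▸ lt_irrefl a)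
      rw [ih, List.count_cons, hne]
      simp
    · rfl

-- invariant of B's merge loop on sorted inputs: counts are the truncated difference
theorem pvLoop_count (sb : List Char) : ∀ (sa out : List Char) (c : Char),
    sa.Pairwise (· ≤ ·) → sb.Pairwise (· ≤ ·) →
    (pvLoop sa out sb).count c = out.count c + (sb.count c - sa.count c) := by
  induction sb with
  | nil => intro sa out c _ _; simp [pvLoop]
  | cons ch sb ih =>
    intro sa out c ha hb
    have hb' : sb.Pairwise (· ≤ ·) := (List.pairwise_cons.1 hb).2
    have hsa' : (pvSkip ch sa).Pairwise (· ≤ ·) := ha.sublist (pvSkip_sublist ch sa)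
    simp only [pvLoop]
    cases hsk : pvSkip ch sa with
    | nil =>
      dsimp only
      rw [ih [] (out ++ [ch]) c (by simp) hb']
      rcases lt_trichotomy c ch with hlt | rfl | hgt
      · have h2 : (ch :: sb).count c = 0 := pv_count_head_lt hb hlt
        have h2' : sb.count c = 0 := by
          rw [List.count_cons] at h2; omega
        simp [List.count_append, h2', Ne.symm (ne_of_lt hlt)]
      · have h0 : sa.count c = 0 := by rw [← pvSkip_count_ge (le_refl c) sa, hsk]; rfl
        simp [List.count_append, List.count_cons, h0]
        omega
      · have h0 : sa.count c = 0 := by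
          rw [← pvSkip_count_ge (le_of_lt hgt) sa, hsk]; rfl
        simp [List.count_append, List.count_cons, h0, Ne.symm (ne_of_gt hgt)]
    | cons a rest =>
      dsimp only
      have hrest : rest.Pairwise (· ≤ ·) := (List.pairwise_cons.1 (hsk ▸ hsa')).2
      have hskp : (a :: rest).Pairwise (· ≤ ·) := hsk ▸ hsa'
      by_cases hac : a = ch
      · rw [if_pos hac, ih rest out c hrest hb']
        rcases lt_trichotomy c ch with hlt | rfl | hgt
        · have h2 : (ch :: sb).count c = 0 := pv_count_head_lt hb hlt
          rw [List.count_cons] at h2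
          have h2' : sb.count c = 0 := by omega
          have hne : ch ≠ c := Ne.symm (ne_of_lt hlt)
          have hne' : a ≠ c := by rw [hac]; exact hne
          simp [h2', hne]
        · have h0 : sa.count c = (a :: rest).count c := by
            rw [← pvSkip_count_ge (le_refl c) sa, hsk]
          rw [h0]
          simp [hac]
        · have hne : ch ≠ c := Ne.symm (ne_of_gt hgt)
          have hne' : a ≠ c := by rw [hac]; exact hne
          have h0 : sa.count c = (a :: rest).count c := by
            rw [← pvSkip_count_ge (le_of_lt hgt) sa, hsk]
          rw [h0]
          simp [hne, hne']
      · rw [if_neg hac, ih (a :: rest) (out ++ [ch]) c hskp hb']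
        have hcha : ch < a := lt_of_le_of_ne (not_lt.1 (pvSkip_head_not_lt ch sa hsk)) (Ne.symm hac)
        rcases lt_trichotomy c ch with hlt | rfl | hgt
        · have h2 : (ch :: sb).count c = 0 := pv_count_head_lt hb hlt
          rw [List.count_cons] at h2
          have h2' : sb.count c = 0 := by omega
          simp [List.count_append, h2', Ne.symm (ne_of_lt hlt)]
        · have h0 : sa.count c = 0 := by
            rw [← pvSkip_count_ge (le_refl c) sa, hsk]
            exact pv_count_head_lt hskp hcha
          have h1 : rest.count c + (if a = c then 1 else 0) = 0 := by
            have h2 := pv_count_head_lt hskp hcha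
            rw [List.count_cons] at h2
            simpa using h2
          simp [List.count_append, List.count_cons, h0]
          omega
        · have h0 : sa.count c = (a :: rest).count c := by
            rw [← pvSkip_count_ge (le_of_lt hgt) sa, hsk]
          rw [h0]
          simp [List.count_append, List.count_cons, Ne.symm (ne_of_gt hgt)]

-- the output of B's loop is out ++ (a sublist of sb), hence sorted when sb is
theorem pvLoop_out (sb : List Char) : ∀ (sa out : List Char),
    ∃ t, pvLoop sa out sb = out ++ t ∧ t.Sublist sb := by
  induction sb with
  | nil => intro sa out; exact ⟨[], by simp [pvLoop], List.nil_sublist _⟩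
  | cons ch sb ih =>
    intro sa out
    simp only [pvLoop]
    cases pvSkip ch sa with
    | nil =>
      dsimp only
      obtain ⟨t, h1, h2⟩ := ih [] (out ++ [ch])
      exact ⟨ch :: t, by simpa using h1, List.cons_sublist_cons.2 h2⟩
    | cons a rest =>
      dsimp only
      by_cases hac : a = ch
      · rw [if_pos hac]
        obtain ⟨t, h1, h2⟩ := ih rest out
        exact ⟨t, h1, h2.trans (List.sublist_cons_self ch sb)⟩
      · rw [if_neg hac]
        obtain ⟨t, h1, h2⟩ := ih (a :: rest) (out ++ [ch])
        exact ⟨ch :: t, by simpa using h1, List.cons_sublist_cons.2 h2⟩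

-- ===== A side =====

-- the per-key block A's loop appends for the key k
def pvG (l1 l2 : List Char) (k : Char) : List Char :=
  if !((PySem.Dict.counter l1).contains k) then List.replicate ((l2.count k : Int)).toNat k
  else if ((l2.count k : Int)) > (PySem.Dict.counter l1).getD k 0 then
    List.replicate (((l2.count k : Int)) - (PySem.Dict.counter l1).getD k 0).toNat k
  else []

theorem pvG_eq_replicate (l1 l2 : List Char) (k : Char) :
    pvG l1 l2 k = List.replicate (l2.count k - l1.count k) k := by
  unfold pvG
  rw [PySem.Dict.contains_counter, PySem.Dict.getD_counter]
  by_cases h1 : k ∈ l1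
  · have : l1.contains k = true := List.contains_iff_mem.2 h1
    rw [this]
    simp only [Bool.not_true, Bool.false_eq_true, if_false, gt_iff_lt, Nat.cast_lt]
    split_ifs with h2
    · rw [Int.toNat_sub]
    · have : l2.count k - l1.count k = 0 := by omega
      rw [this]; rfl
  · have hc : l1.contains k = false := by
      rw [← Bool.not_eq_true, List.contains_iff_mem]; exact h1
    have h0 : l1.count k = 0 := List.count_eq_zero.2 h1
    rw [hc]
    simp [h0, Int.toNat_natCast]

theorem pv_count_flatMap (l1 l2 : List Char) (c : Char) : ∀ (ks : List Char), ks.Nodup →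
    (ks.flatMap (pvG l1 l2)).count c = if c ∈ ks then l2.count c - l1.count c else 0 := by
  intro ks
  induction ks with
  | nil => intro _; simp
  | cons k ks ih =>
    intro hnd
    rw [List.flatMap_cons, List.count_append, ih hnd.of_cons, pvG_eq_replicate, List.count_replicate]
    by_cases hkc : k = c
    · subst hkc
      have : k ∉ ks := (List.nodup_cons.1 hnd).1
      simp [this]
    · simp [hkc, List.mem_cons, Ne.symm hkc]

-- the count of each character in A's raw result list
theorem pv_countA (l1 l2 : List Char) (c : Char) :
    (((PySem.Dict.counter l2).items).foldl (fun r p =>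
      if !((PySem.Dict.counter l1).contains p.1) then r ++ List.replicate p.2.toNat p.1
      else if p.2 > (PySem.Dict.counter l1).getD p.1 0 then
        r ++ List.replicate (p.2 - (PySem.Dict.counter l1).getD p.1 0).toNat p.1
      else r) []).count c = l2.count c - l1.count c := by
  have hfold : ∀ (l : List (Char × Int)) (acc : List Char),
      (l.foldl (fun r p =>
        if !((PySem.Dict.counter l1).contains p.1) then r ++ List.replicate p.2.toNat p.1
        else if p.2 > (PySem.Dict.counter l1).getD p.1 0 then
          r ++ List.replicate (p.2 - (PySem.Dict.counter l1).getD p.1 0).toNat p.1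
        else r) acc) = acc ++ l.flatMap (fun p =>
        if !((PySem.Dict.counter l1).contains p.1) then List.replicate p.2.toNat p.1
        else if p.2 > (PySem.Dict.counter l1).getD p.1 0 then
          List.replicate (p.2 - (PySem.Dict.counter l1).getD p.1 0).toNat p.1
        else []) := by
    intro l
    induction l with
    | nil => intro acc; simp
    | cons p l ihl =>
      intro acc
      rw [List.foldl_cons, List.flatMap_cons, ihl]
      split_ifs <;> simp
  rw [hfold, PySem.Dict.items_counter, List.flatMap_map, List.nil_append]
  show (List.flatMap (pvG l1 l2) (PySem.Set.ofList l2)).count c = l2.count c - l1.count c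
  rw [pv_count_flatMap l1 l2 c _ (PySem.Set.nodup_ofList l2)]
  by_cases h : c ∈ l2
  · rw [if_pos ((PySem.Set.mem_ofList l2 c).2 h)]
  · rw [if_neg (fun hm => h ((PySem.Set.mem_ofList l2 c).1 hm))]
    have : l2.count c = 0 := List.count_eq_zero.2 h
    omega

-- the two programs' core lists coincide
theorem pv_main (l1 l2 : List Char) :
    PySem.List.sorted (((PySem.Dict.counter l2).items).foldl (fun r p =>
      if !((PySem.Dict.counter l1).contains p.1) then r ++ List.replicate p.2.toNat p.1
      else if p.2 > (PySem.Dict.counter l1).getD p.1 0 then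
        r ++ List.replicate (p.2 - (PySem.Dict.counter l1).getD p.1 0).toNat p.1
      else r) []) (fun x => x) false
    = pvLoop (PySem.List.sorted l1 (fun x => x) false) []
        (PySem.List.sorted l2 (fun x => x) false) := by
  set resA := (((PySem.Dict.counter l2).items).foldl (fun r p =>
      if !((PySem.Dict.counter l1).contains p.1) then r ++ List.replicate p.2.toNat p.1
      else if p.2 > (PySem.Dict.counter l1).getD p.1 0 then
        r ++ List.replicate (p.2 - (PySem.Dict.counter l1).getD p.1 0).toNat p.1
      else r) []) with hresA
  set sa := PySem.List.sorted l1 (fun x => x) false with hsa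
  set sb := PySem.List.sorted l2 (fun x => x) false with hsb
  have hpa : sa.Pairwise (· ≤ ·) := PySem.List.sorted_pairwise l1 (fun x => x)
  have hpb : sb.Pairwise (· ≤ ·) := PySem.List.sorted_pairwise l2 (fun x => x)
  obtain ⟨t, ht, hts⟩ := pvLoop_out sb sa []
  have hcount : ∀ c : Char,
      (PySem.List.sorted resA (fun x => x) false).count c = (pvLoop sa [] sb).count c := by
    intro c
    rw [(PySem.List.sorted_perm resA (fun x => x) false).count_eq,
        pvLoop_count sb sa [] c hpa hpb, hresA, pv_countA l1 l2 c, hsb, hsa,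
        (PySem.List.sorted_perm l2 (fun x => x) false).count_eq,
        (PySem.List.sorted_perm l1 (fun x => x) false).count_eq]
    simp
  have hperm : (PySem.List.sorted resA (fun x => x) false).Perm (pvLoop sa [] sb) :=
    List.perm_iff_count.2 hcount
  have hsortA : (PySem.List.sorted resA (fun x => x) false).Pairwise (· ≤ ·) :=
    PySem.List.sorted_pairwise resA (fun x => x)
  have hsortB : (pvLoop sa [] sb).Pairwise (· ≤ ·) := by
    rw [ht]; simpa using hpb.sublist hts
  exact PySem.List.eq_of_perm_of_pairwise_le_of_injective (fun x => x)
    (fun a b h => h) hperm hsortA hsortB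

-- ===== VERDICT (by name: the statement is the Claim_ definition above) =====
theorem findAdded_spec : Claim_equal_findAdded := by
  intro s1 s2 _
  unfold Spec_findAdded
  show findAdded s1 s2 = findAdded_alt s1 s2
  exact congrArg String.mk (pv_main s1.toList s2.toList)
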